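-- pv_equiv track=rewrite | github.com/mohamadsolkhannawawi/informatics-practicum-portfolio | Semester-1/07-Programming-Fundamentals/pythonTest1.py | InversBinary
-- ===== SOURCE A (Python) =====
-- def konsi(e,L):
--     if L == []:
--         return [e]
--     else:
--         return L + [e]
--
-- def FirstElmt(L):
--     if L == []:
--         return None
--     else:
--         return L[0]
--
-- def tail(L):
--     if L == []:
--         return []
--     else:
--         return L[1:]
--
-- def InversBinary(DNA):
--     if DNA == []:
--         return []
--     elif FirstElmt(DNA) == 'A':
--         return konsi('00',InversBinary(tail(DNA)))
--     elif FirstElmt(DNA) == 'C':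
--         return konsi('01',InversBinary(tail(DNA)))
--     elif FirstElmt(DNA) == 'G':
--         return konsi('10',InversBinary(tail(DNA)))
--     else:
--         return konsi('11',InversBinary(tail(DNA)))
-- ===== SOURCE B (Python) =====
-- def InversBinary(DNA):
--     codes = {'A': '00', 'C': '01', 'G': '10'}
--     result = []
--     while DNA != []:
--         result = [codes.get(DNA[0], '11')] + result
--         DNA = DNA[1:]
--     return result
-- ===== Notes on version B (the rewrite author's own statement) =====
-- stated objective: simpler
-- what changed: Replaced the three recursive helpers (konsi/FirstElmt/tail) and list-appending recursion with a single iterative head/tail loop that looks codes up in a dict and prepends to an accumulator, so the reversal falls out of the loop order.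
import Mathlib
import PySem

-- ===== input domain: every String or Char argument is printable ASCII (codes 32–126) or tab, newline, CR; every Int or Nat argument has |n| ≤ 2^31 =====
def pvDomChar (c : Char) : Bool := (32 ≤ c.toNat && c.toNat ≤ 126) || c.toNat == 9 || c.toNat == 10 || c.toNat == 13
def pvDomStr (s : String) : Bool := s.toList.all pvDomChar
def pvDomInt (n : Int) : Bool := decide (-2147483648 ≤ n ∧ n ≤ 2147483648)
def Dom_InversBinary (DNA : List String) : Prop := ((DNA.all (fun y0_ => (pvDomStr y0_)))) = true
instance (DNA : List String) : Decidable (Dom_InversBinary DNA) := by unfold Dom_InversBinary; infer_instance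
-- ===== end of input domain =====

-- B replaces A's three recursive helpers with one iterative head/tail loop over a code
-- dict that prepends into an accumulator (objective: simpler).

-- ===== PORT A =====
def konsi (e : String) (L : List String) : List String :=
  if L = [] then [e] else L ++ [e]

def FirstElmt (L : List String) : Option String :=
  if L = [] then none else some L[0]!

def tailA (L : List String) : List String :=
  if L = [] then [] else L.drop 1

def InversBinary (DNA : List String) : List String :=
  if hA0 : DNA = [] then []
  else if FirstElmt DNA = some "A" then konsi "00" (InversBinary (tailA DNA))
  else if FirstElmt DNA = some "C" then konsi "01" (InversBinary (tailA DNA))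
  else if FirstElmt DNA = some "G" then konsi "10" (InversBinary (tailA DNA))
  else konsi "11" (InversBinary (tailA DNA))
termination_by DNA.length
decreasing_by all_goals
  · simp [tailA, hA0]
    cases DNA with
    | nil => exact absurd rfl hA0
    | cons a t => simp

-- ===== PORT B =====
-- the while loop: result = [codes.get(DNA[0],'11')] + result; DNA = DNA[1:]
def ibLoop (codes : PySem.Dict String String) : List String → List String → List String
  | [], result => result
  | h :: t, result => ibLoop codes t (codes.getD h "11" :: result)

def InversBinary_alt (DNA : List String) : List String :=
  ibLoop (PySem.Dict.ofList [("A", "00"), ("C", "01"), ("G", "10")]) DNA []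

-- ===== PRECONDITION & SPEC =====
def Spec_InversBinary (DNA : List String) (out : List String) : Prop := out = InversBinary_alt DNA
instance (DNA : List String) (out : List String) : Decidable (Spec_InversBinary DNA out) := by unfold Spec_InversBinary; infer_instance

-- ===== CLAIM (what is proved, stated in full; the proofs are below) =====
def Claim_equal_InversBinary : Prop := ∀ (DNA : List String), Dom_InversBinary DNA → Spec_InversBinary DNA (InversBinary DNA)

-- ===== LEMMAS AND PROOFS =====
lemma getD_codes (h : String) :
    (PySem.Dict.ofList [("A","00"),("C","01"),("G","10")]).getD h "11" =
    if h = "A" then "00" else if h = "C" then "01" else if h = "G" then "10" else "11" := by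
  simp [PySem.Dict.ofList, PySem.Dict.update, PySem.Dict.empty, PySem.Dict.insert,
        PySem.Dict.getD, PySem.Dict.get?, List.find?, beq_iff_eq]
  split_ifs with h1 h2 h3 <;> simp_all [eq_comm]
  rw [beq_eq_false_iff_ne.mpr (Ne.symm h1), beq_eq_false_iff_ne.mpr (Ne.symm h2),
      beq_eq_false_iff_ne.mpr (Ne.symm h3)]
  rfl

lemma ibLoop_eq_A (DNA acc : List String) :
    ibLoop (PySem.Dict.ofList [("A", "00"), ("C", "01"), ("G", "10")]) DNA acc = InversBinary DNA ++ acc := by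
  induction DNA generalizing acc with
  | nil => simp [ibLoop, InversBinary]
  | cons h t ih =>
    rw [InversBinary]
    simp only [ibLoop, ih, FirstElmt, tailA, konsi, getD_codes]
    split_ifs <;> simp_all

-- ===== VERDICT (by name: the statement is the Claim_ definition above) =====
theorem InversBinary_spec : Claim_equal_InversBinary := by
  intro DNA _
  unfold Spec_InversBinary InversBinary_alt
  rw [ibLoop_eq_A, List.append_nil]
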